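-- pv_equiv track=rewrite | github.com/Isabelaodcm/codigos-pds | sinais_elementares.py | rampa
-- ===== SOURCE A (Python) =====
-- def rampa(n):
--     valores = []
--     for valor in range(-n, n+1):
--         if valor <0:
--             valores.append(0)
--
--         else:
--             valores.append(valor)
--
--     return valores
-- ===== SOURCE B (Python) =====
-- def rampa(n):
--     return [0] * n + list(range(0, n + 1))
-- ===== Notes on version B (the rewrite author's own statement) =====
-- stated objective: simpler
-- what changed: Replaces the per-element loop with a sign test by direct construction: a replicated zero-block of length n concatenated with list(range(0, n+1)).
import Mathlib
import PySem

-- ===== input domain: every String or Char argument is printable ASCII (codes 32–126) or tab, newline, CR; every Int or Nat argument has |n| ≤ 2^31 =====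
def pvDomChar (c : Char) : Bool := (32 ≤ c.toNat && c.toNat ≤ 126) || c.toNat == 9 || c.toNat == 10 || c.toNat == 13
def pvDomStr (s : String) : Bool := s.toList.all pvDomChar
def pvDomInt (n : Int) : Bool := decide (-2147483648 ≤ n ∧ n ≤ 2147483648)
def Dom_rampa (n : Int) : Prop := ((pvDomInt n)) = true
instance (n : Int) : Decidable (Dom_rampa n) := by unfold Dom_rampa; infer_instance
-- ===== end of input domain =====

-- B replaces A's per-element loop with a sign test by direct construction:
-- a zero-block of length n concatenated with the range 0..n (objective: simpler).

-- ===== PORT A =====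
def rampa (n : Int) : List Int :=
  (PySem.List.pyRange (-n) (n + 1) 1).foldl
    (fun valores valor => if valor < 0 then valores ++ [0] else valores ++ [valor]) []

-- ===== PORT B =====
def rampa_alt (n : Int) : List Int :=
  List.replicate n.toNat 0 ++ PySem.List.pyRange 0 (n + 1) 1

-- ===== PRECONDITION & SPEC =====
def Spec_rampa (n : Int) (out : List Int) : Prop := out = rampa_alt n
instance (n : Int) (out : List Int) : Decidable (Spec_rampa n out) := by unfold Spec_rampa; infer_instance

-- ===== CLAIM (what is proved, stated in full; the proofs are below) =====
def Claim_equal_rampa : Prop := ∀ (n : Int), Dom_rampa n → Spec_rampa n (rampa n)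

-- ===== LEMMAS AND PROOFS =====

-- A's loop is a map over the range
theorem rampa_eq_map (n : Int) :
    rampa n = (PySem.List.pyRange (-n) (n + 1) 1).map
      (fun valor => if valor < 0 then 0 else valor) := by
  unfold rampa
  generalize PySem.List.pyRange (-n) (n + 1) 1 = xs
  induction xs using List.reverseRecOn with
  | nil => rfl
  | append_singleton xs x ih =>
      simp [List.foldl_append, List.map_append, ih]
      split_ifs <;> simp

theorem map_neg_range (n : Int) (hn : 0 ≤ n) :
    (PySem.List.pyRange (-n) 0 1).map (fun valor => if valor < 0 then 0 else valor)
      = List.replicate n.toNat 0 := by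
  apply List.eq_replicate_iff.mpr
  constructor
  · simp [PySem.List.length_pyRange_one]
  · intro b hb
    simp only [List.mem_map] at hb
    obtain ⟨x, hx, hbx⟩ := hb
    rw [PySem.List.mem_pyRange_one] at hx
    simp [show x < 0 by omega] at hbx
    exact hbx.symm

theorem map_pos_range (n : Int) :
    (PySem.List.pyRange 0 (n + 1) 1).map (fun valor => if valor < 0 then 0 else valor)
      = PySem.List.pyRange 0 (n + 1) 1 := by
  conv_rhs => rw [← List.map_id (PySem.List.pyRange 0 (n + 1) 1)]
  apply List.map_congr_left
  intro x hx
  rw [PySem.List.mem_pyRange_one] at hx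
  simp [show ¬ x < 0 by omega]

-- ===== VERDICT (by name: the statement is the Claim_ definition above) =====
theorem rampa_spec : Claim_equal_rampa := by
  intro n _
  unfold Spec_rampa rampa_alt
  rw [rampa_eq_map]
  by_cases hn : 0 ≤ n
  · rw [PySem.List.pyRange_one_append (-n) 0 (n + 1) (by omega) (by omega),
      List.map_append, map_neg_range n hn, map_pos_range]
  · rw [PySem.List.pyRange_one_eq_nil (by omega),
      PySem.List.pyRange_one_eq_nil (by omega)]
    simp [Int.toNat_of_nonpos (by omega : n ≤ 0)]
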